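-- pv_equiv track=rewrite | github.com/lidongdongbuaa/leetcode2.0 | 巨硬/oa/Largest M-aligned Subset.py | countLength
-- ===== SOURCE A (Python) =====
-- def countLength(arr, M):
--     if arr is None:
--         return 0
--     if len(arr) == 1:
--         return 0
--     if M == 1:
--         return len(arr)
--
--     arr.sort()
--
--     ans = 0
--
--     for i in range(len(arr) - 1):
--         tmp = []
--         for j in range(i + 1, len(arr)):
--             if (arr[j] - arr[i]) % M == 0:
--                 tmp.append(j)
--         if len(tmp) > 0:
--             tmp.append(i)
--         ans = max(ans, len(tmp))
--     return ans
-- ===== SOURCE B (Python) =====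
-- def countLength(arr, M):
--     if arr is None:
--         return 0
--     if len(arr) < 2:
--         return 0
--     counts = {}
--     for x in arr:
--         r = x % M
--         counts[r] = counts.get(r, 0) + 1
--     best = 0
--     for c in counts.values():
--         if c > best:
--             best = c
--     return best if best >= 2 else 0
-- ===== Notes on version B (the rewrite author's own statement) =====
-- stated objective: faster
-- what changed: Replaces the sort plus quadratic all-pairs scan with a single pass that counts residues mod M in a dict and returns the largest class size when it is at least 2, else 0.
import Mathlib
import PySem

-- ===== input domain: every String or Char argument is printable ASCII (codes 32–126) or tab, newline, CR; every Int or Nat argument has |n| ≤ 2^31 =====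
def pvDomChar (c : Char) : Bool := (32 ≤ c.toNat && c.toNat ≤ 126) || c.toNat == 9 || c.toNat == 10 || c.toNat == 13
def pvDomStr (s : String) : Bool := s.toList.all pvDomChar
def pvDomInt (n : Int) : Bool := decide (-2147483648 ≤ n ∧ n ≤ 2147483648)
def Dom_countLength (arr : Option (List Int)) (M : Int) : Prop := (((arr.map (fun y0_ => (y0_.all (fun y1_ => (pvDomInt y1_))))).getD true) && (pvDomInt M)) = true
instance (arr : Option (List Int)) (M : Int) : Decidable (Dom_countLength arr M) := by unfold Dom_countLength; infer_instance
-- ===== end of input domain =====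

-- B replaces A's sort + quadratic all-pairs scan by a one-pass residue counter (largest class size if ≥ 2, else 0);
-- equivalence is about the RETURN value only: A sorts its list argument in place, B does not mutate it.


-- ===== PORT A =====
def countLength (arr : Option (List Int)) (M : Int) : Int :=
  match arr with
  | none => 0
  | some arr0 =>
    if arr0.length = 1 then 0
    else if M = 1 then (arr0.length : Int)
    else
      let a := PySem.List.sorted arr0 (fun x => x) false
      (PySem.List.pyRange 0 ((a.length : Int) - 1) 1).foldl (fun ans i =>
        let tmp : List Int := (PySem.List.pyRange (i + 1) (a.length : Int) 1).foldl (fun tmp j =>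
          if PySem.Int.mod (PySem.List.pyGetD a j 0 - PySem.List.pyGetD a i 0) M = 0 then tmp ++ [j] else tmp) []
        let tmp := if tmp.length > 0 then tmp ++ [i] else tmp
        max ans (tmp.length : Int)) 0

-- ===== PORT B =====
def countLength_alt (arr : Option (List Int)) (M : Int) : Int :=
  match arr with
  | none => 0
  | some l =>
    if l.length < 2 then 0
    else
      let counts := l.foldl (fun d x => d.insert (PySem.Int.mod x M) (d.getD (PySem.Int.mod x M) 0 + 1))
        (PySem.Dict.empty : PySem.Dict Int Int)
      let best := counts.values.foldl (fun b c => if c > b then c else b) 0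
      if best ≥ 2 then best else 0

-- ===== PRECONDITION & SPEC =====
-- Pre_ excludes only the inputs where A raises ZeroDivisionError: M = 0 with a list of length ≥ 2.
def Pre_countLength (arr : Option (List Int)) (M : Int) : Prop := M ≠ 0 ∨ (arr.getD []).length ≤ 1
instance (arr : Option (List Int)) (M : Int) : Decidable (Pre_countLength arr M) := by unfold Pre_countLength; infer_instance
def pvWitness_countLength : Option (List Int) × Int := (some [3, 7, 10, -1], 4)

def Spec_countLength (arr : Option (List Int)) (M : Int) (out : Int) : Prop := out = countLength_alt arr M
instance (arr : Option (List Int)) (M : Int) (out : Int) : Decidable (Spec_countLength arr M out) := by unfold Spec_countLength; infer_instance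

-- ===== CLAIM (what is proved, stated in full; the proofs are below) =====
def Claim_equal_countLength : Prop := ∀ (arr : Option (List Int)) (M : Int), Dom_countLength arr M → Pre_countLength arr M → Spec_countLength arr M (countLength arr M)

-- ===== LEMMAS AND PROOFS =====

-- Python floored mod: two ints have equal residues mod M ≠ 0 iff M divides their difference.
lemma pymod_eq_pymod_iff (x y M : Int) (hM : M ≠ 0) :
    PySem.Int.mod x M = PySem.Int.mod y M ↔ M ∣ (x - y) := by
  have hx := PySem.Int.floordiv_mul_add_mod x M
  have hy := PySem.Int.floordiv_mul_add_mod y M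
  constructor
  · intro h
    exact ⟨PySem.Int.floordiv x M - PySem.Int.floordiv y M, by linarith [h]⟩
  · intro h
    have hd : M ∣ (PySem.Int.mod x M - PySem.Int.mod y M) := by
      have : PySem.Int.mod x M - PySem.Int.mod y M
          = (x - y) - (PySem.Int.floordiv x M - PySem.Int.floordiv y M) * M := by ring_nf; linarith
      rw [this]
      exact dvd_sub h (Dvd.intro_left _ rfl)
    have hz : PySem.Int.mod x M - PySem.Int.mod y M = 0 := by
      rcases lt_or_gt_of_ne hM with hneg | hpos
      · have b1 := PySem.Int.mod_neg_bounds x hneg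
        have b2 := PySem.Int.mod_neg_bounds y hneg
        exact Int.eq_zero_of_abs_lt_dvd ((neg_dvd).mpr hd) (by rw [abs_lt]; constructor <;> linarith)
      · have b1n := PySem.Int.mod_nonneg x hpos
        have b1l := PySem.Int.mod_lt x hpos
        have b2n := PySem.Int.mod_nonneg y hpos
        have b2l := PySem.Int.mod_lt y hpos
        exact Int.eq_zero_of_abs_lt_dvd hd (by rw [abs_lt]; constructor <;> linarith)
    linarith

lemma foldl_max_le {α : Type} (F : α → Int) (l : List α) (a c : Int)
    (ha : a ≤ c) (h : ∀ x ∈ l, F x ≤ c) :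
    l.foldl (fun b x => max b (F x)) a ≤ c := by
  induction l generalizing a with
  | nil => simpa using ha
  | cons x t ih =>
    simp only [List.foldl_cons]
    exact ih (max a (F x)) (by have := h x (by simp); omega) (fun y hy => h y (by simp [hy]))

lemma foldl_max_eq_of_mem_iff (F : Int → Int) (l1 l2 : List Int)
    (h : ∀ x, x ∈ l1 ↔ x ∈ l2) :
    l1.foldl (fun b x => max b (F x)) 0 = l2.foldl (fun b x => max b (F x)) 0 := by
  have h1 := PySem.List.le_foldl_max_int l1 F 0
  have h2 := PySem.List.le_foldl_max_int l2 F 0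
  apply le_antisymm
  · exact foldl_max_le F l1 0 _ h2.1 (fun x hx => h2.2 x ((h x).mp hx))
  · exact foldl_max_le F l2 0 _ h1.1 (fun x hx => h1.2 x ((h x).mpr hx))

-- the largest multiplicity of an element of r
def bestOf (r : List Int) : Int := r.foldl (fun b x => max b ((r.count x : Int))) 0

lemma bestOf_nonneg (r : List Int) : 0 ≤ bestOf r :=
  (PySem.List.le_foldl_max_int r _ 0).1

lemma bestOf_cons (x : Int) (t : List Int) :
    bestOf (x :: t) = max ((t.count x : Int) + 1) (bestOf t) := by
  have hful := PySem.List.le_foldl_max_int (x :: t) (fun z => (((x :: t).count z : Int))) 0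
  have hbt := PySem.List.le_foldl_max_int t (fun z => ((t.count z : Int))) 0
  unfold bestOf
  apply le_antisymm
  · apply foldl_max_le _ _ _ _ (le_trans (hbt.1) (le_max_right _ _))
    intro y hy
    by_cases hxy : y = x
    · subst hxy; rw [List.count_cons_self]; push_cast; omega
    · rw [List.count_cons_of_ne (Ne.symm hxy)]
      rcases List.mem_cons.mp hy with h | h
      · exact absurd h hxy
      · exact le_trans (hbt.2 y h) (le_max_right _ _)
  · apply max_le
    · have h1 := hful.2 x (by simp)
      rw [List.count_cons_self] at h1
      push_cast at h1
      exact h1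
    · apply foldl_max_le _ _ _ _ hful.1
      intro y hy
      refine le_trans ?_ (hful.2 y (by simp [hy]))
      by_cases hxy : y = x
      · subst hxy; rw [List.count_cons_self]; push_cast; omega
      · rw [List.count_cons_of_ne (Ne.symm hxy)]

lemma bestOf_perm (r r' : List Int) (h : r.Perm r') : bestOf r = bestOf r' := by
  unfold bestOf
  rw [PySem.List.foldl_congr_mem _ _ (fun b x => max b ((r'.count x : Int))) _
      (fun acc x _ => by rw [h.count_eq])]
  exact foldl_max_eq_of_mem_iff _ _ _ (fun x => h.mem_iff)

lemma mod_one_eq_zero (x : Int) : PySem.Int.mod x 1 = 0 := by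
  have h1 := PySem.Int.mod_nonneg x (by norm_num : (0:Int) < 1)
  have h2 := PySem.Int.mod_lt x (by norm_num : (0:Int) < 1)
  omega

lemma bestOf_mod_one (l : List Int) (hl : l ≠ []) :
    bestOf (l.map (fun x => PySem.Int.mod x 1)) = (l.length : Int) := by
  have hrep : l.map (fun x => PySem.Int.mod x 1) = List.replicate l.length 0 := by
    rw [List.eq_replicate_iff]
    constructor
    · simp
    · intro b hb
      obtain ⟨x, _, hx⟩ := List.mem_map.mp hb
      rw [← hx, mod_one_eq_zero]
  rw [hrep]
  have hn : l.length ≠ 0 := by simp [hl]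
  apply le_antisymm
  · apply foldl_max_le _ _ _ _ (by positivity)
    intro y hy
    have := List.count_le_length (l := List.replicate l.length (0:Int)) (a := y)
    simp at this ⊢
    omega
  · have hmem : (0 : Int) ∈ List.replicate l.length (0:Int) := List.mem_replicate.mpr ⟨hn, rfl⟩
    have := (PySem.List.le_foldl_max_int (List.replicate l.length (0:Int))
      (fun z => (((List.replicate l.length (0:Int)).count z : Int))) 0).2 0 hmem
    simpa using this

-- structural form of A's outer loop on the residue list of the sorted array
def gA : List Int → Int
  | [] => 0
  | x :: t => max (gA t) (if (t.count x : Int) > 0 then (t.count x : Int) + 1 else 0)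

lemma gA_eq_bestOf (r : List Int) : gA r = if bestOf r ≥ 2 then bestOf r else 0 := by
  induction r with
  | nil => simp [gA, bestOf]
  | cons x t ih =>
    have hbt := bestOf_nonneg t
    have hc : (0 : Int) ≤ (t.count x : Int) := by positivity
    rw [gA, ih, bestOf_cons]
    split_ifs <;> omega

lemma loopA_eq_gA (r : List Int) (a : Int) (ha : 0 ≤ a) :
    (List.range (r.length - 1)).foldl (fun ans k =>
      let c : Int := ((r.drop (k + 1)).count (r[k]?.getD 0) : Int)
      max ans (if c > 0 then c + 1 else 0)) a = max a (gA r) := by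
  induction r generalizing a with
  | nil => simp [gA]; omega
  | cons x t ih =>
    match t with
    | [] => simp [gA]; omega
    | y :: t' =>
      have hlen : (x :: y :: t').length - 1 = ((y :: t').length - 1) + 1 := by simp
      rw [hlen, List.range_succ_eq_map]
      simp only [List.foldl_cons, List.foldl_map]
      have hbody : ∀ (ans : Int) (k : Nat),
          (let c : Int := (((x :: y :: t').drop (k + 1 + 1)).count ((x :: y :: t')[k + 1]?.getD 0) : Int)
           max ans (if c > 0 then c + 1 else 0))
          = (let c : Int := (((y :: t').drop (k + 1)).count ((y :: t')[k]?.getD 0) : Int)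
             max ans (if c > 0 then c + 1 else 0)) := by
        intro ans k
        simp [List.drop_succ_cons]
      simp only [hbody]
      rw [ih _ (by positivity)]
      have : gA (x :: y :: t') = max (gA (y :: t')) (if ((y :: t').count x : Int) > 0 then ((y :: t').count x : Int) + 1 else 0) := rfl
      rw [this]
      simp only [List.drop_succ_cons, List.drop_zero, List.getElem?_cons_zero, Option.getD_some]
      omega

lemma gA_nonneg (r : List Int) : 0 ≤ gA r := by
  rw [gA_eq_bestOf]
  have := bestOf_nonneg r
  split <;> omega


lemma aLoop (a : List Int) (M : Int) (hM : M ≠ 0) :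
    (PySem.List.pyRange 0 ((a.length : Int) - 1) 1).foldl (fun ans i =>
      let tmp : List Int := (PySem.List.pyRange (i + 1) (a.length : Int) 1).foldl (fun tmp j =>
        if PySem.Int.mod (PySem.List.pyGetD a j 0 - PySem.List.pyGetD a i 0) M = 0 then tmp ++ [j] else tmp) []
      let tmp := if tmp.length > 0 then tmp ++ [i] else tmp
      max ans (tmp.length : Int)) 0
    = gA (a.map (fun x => PySem.Int.mod x M)) := by
  match a with
  | [] =>
    rw [PySem.List.pyRange_one_eq_nil (by norm_num)]
    simp [gA]
  | b :: s =>
  set a := b :: s with hadef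
  have hn1 : ((a.length : Int) - 1) = ((a.length - 1 : Nat) : Int) := by
    simp [hadef]
  rw [hn1, PySem.List.pyRange_zero_natCast, List.foldl_map]
  set r := a.map (fun x => PySem.Int.mod x M) with hrdef
  have hlr : r.length = a.length := by simp [hrdef]
  have hcongr : ∀ (ans : Int), ∀ k ∈ List.range (a.length - 1),
      (fun (ans : Int) (k : Nat) =>
        let tmp : List Int := (PySem.List.pyRange ((k : Int) + 1) (a.length : Int) 1).foldl (fun tmp j =>
          if PySem.Int.mod (PySem.List.pyGetD a j 0 - PySem.List.pyGetD a (k : Int) 0) M = 0 then tmp ++ [j] else tmp) []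
        let tmp := if tmp.length > 0 then tmp ++ [(k : Int)] else tmp
        max ans (tmp.length : Int)) ans k
      = (fun (ans : Int) (k : Nat) =>
        let c : Int := ((r.drop (k + 1)).count (r[k]?.getD 0) : Int)
        max ans (if c > 0 then c + 1 else 0)) ans k := by
    intro ans k hk
    have hk' : k < a.length - 1 := List.mem_range.mp hk
    have hka : k < a.length := by omega
    simp only []
    -- inner loop: if-Prop to if-Bool, then foldl_append_if
    have hif : ∀ (tmp : List Int) (j : Int),
        (if PySem.Int.mod (PySem.List.pyGetD a j 0 - PySem.List.pyGetD a (k : Int) 0) M = 0 then tmp ++ [j] else tmp)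
        = (if (fun j => decide (PySem.Int.mod (PySem.List.pyGetD a j 0 - PySem.List.pyGetD a (k : Int) 0) M = 0)) j = true
           then tmp ++ [id j] else tmp) := by
      intro tmp j; simp
    rw [PySem.List.foldl_congr_mem _ _ _ _ (fun acc x _ => hif acc x),
        PySem.List.foldl_append_if]
    simp only [List.nil_append, List.map_id]
    set p := (fun j => decide (PySem.Int.mod (PySem.List.pyGetD a j 0 - PySem.List.pyGetD a (k : Int) 0) M = 0)) with hp
    have hcnt : ((PySem.List.pyRange ((k : Int) + 1) (a.length : Int) 1).filter p).length
        = (r.drop (k + 1)).count (r[k]?.getD 0) := by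
      rw [show (List.filter p (PySem.List.pyRange ((k : Int) + 1) (a.length : Int) 1)).length = (PySem.List.pyRange ((k : Int) + 1) (a.length : Int) 1).countP p from (List.countP_eq_length_filter).symm]
      have hmapped : (PySem.List.pyRange ((k : Int) + 1) (a.length : Int)).map (fun j => PySem.List.pyGetD a j 0)
          = a.drop (k + 1) := by
        have := PySem.List.map_pyGetD_pyRange' a 0 (a := (k : Int) + 1) (by positivity)
        simpa using this
      have h1 : (PySem.List.pyRange ((k : Int) + 1) (a.length : Int) 1).countP p
          = (a.drop (k + 1)).countP (fun x => decide (PySem.Int.mod (x - PySem.List.pyGetD a (k : Int) 0) M = 0)) := by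
        rw [← hmapped, List.countP_map]
        rfl
      rw [h1]
      -- identify the pivot
      have hget : PySem.List.pyGetD a (k : Int) 0 = a[k] := by
        rw [PySem.List.pyGetD_natCast, List.getD_eq_getElem?_getD, List.getElem?_eq_getElem hka]
        rfl
      have hrk : r[k]?.getD 0 = PySem.Int.mod a[k] M := by
        rw [hrdef]
        simp [List.getElem?_map, List.getElem?_eq_getElem hka]
      have hdropr : r.drop (k + 1) = (a.drop (k + 1)).map (fun x => PySem.Int.mod x M) := by
        rw [hrdef]
        exact (List.map_drop).symm
      rw [hdropr, hrk, List.count_eq_countP, List.countP_map]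
      apply List.countP_congr
      intro x hx
      simp only [Function.comp, hget, decide_eq_true_eq, beq_iff_eq]
      rw [PySem.Int.mod_eq_zero_iff_dvd]
      exact (pymod_eq_pymod_iff x a[k] M hM).symm
    rw [hcnt]
    by_cases hz : (r.drop (k + 1)).count (r[k]?.getD 0) > 0
    · rw [if_pos hz, if_pos (by exact_mod_cast hz)]
      simp
      omega
    · rw [if_neg hz, if_neg (by exact_mod_cast hz)]
      omega
  rw [PySem.List.foldl_congr_mem _ _ _ _ hcongr]
  rw [← hlr] at *
  rw [loopA_eq_gA r 0 le_rfl]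
  have := gA_nonneg r
  omega


lemma altVal (l : List Int) (M : Int) (h : 2 ≤ l.length) :
    countLength_alt (some l) M =
      (if bestOf (l.map (fun x => PySem.Int.mod x M)) ≥ 2
       then bestOf (l.map (fun x => PySem.Int.mod x M)) else 0) := by
  have hfold : l.foldl (fun d x => d.insert (PySem.Int.mod x M) (d.getD (PySem.Int.mod x M) 0 + 1))
        (PySem.Dict.empty : PySem.Dict Int Int)
      = PySem.Dict.counter (l.map (fun x => PySem.Int.mod x M)) := by
    rw [← PySem.Dict.foldl_insert_getD_add_one_eq_counter]
    rw [List.foldl_map]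
  simp only [countLength_alt]
  rw [if_neg (show ¬ l.length < 2 by omega), hfold]
  set r := l.map (fun x => PySem.Int.mod x M) with hr
  have hvals : (PySem.Dict.counter r).values
      = (PySem.Set.ofList r).map (fun k => ((r.count k : Int))) := by
    show (PySem.Dict.counter r).items.map (·.2) = _
    rw [PySem.Dict.items_counter]
    simp [List.map_map, Function.comp]
  rw [hvals]
  have hif : (List.map (fun k => ((r.count k : Int))) (PySem.Set.ofList r)).foldl
      (fun b c => if c > b then c else b) 0 = bestOf r := by
    have h1 : ∀ (b c : Int), (if c > b then c else b) = max b c := by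
      intro b c; split <;> omega
    simp only [h1, List.foldl_map]
    exact foldl_max_eq_of_mem_iff _ _ _ (fun x => PySem.Set.mem_ofList r x)
  rw [hif]

lemma aVal (l : List Int) (M : Int) (h1 : l.length ≠ 1) (hM1 : M ≠ 1) (hM0 : M ≠ 0) :
    countLength (some l) M
      = gA ((PySem.List.sorted l (fun x => x) false).map (fun x => PySem.Int.mod x M)) := by
  simp only [countLength]
  rw [if_neg h1, if_neg hM1]
  exact aLoop (PySem.List.sorted l (fun x => x) false) M hM0

-- ===== VERDICT (by name: the statement is the Claim_ definition above) =====
theorem countLength_spec : Claim_equal_countLength := by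
  unfold Claim_equal_countLength
  intro arr M hdom hpre
  unfold Spec_countLength
  match arr with
  | none => rfl
  | some l =>
    by_cases h2 : l.length < 2
    · match l, h2 with
      | [], _ =>
        simp only [countLength, countLength_alt]
        rw [if_neg (show ¬ ([] : List Int).length = 1 by decide),
            if_pos (show ([] : List Int).length < 2 by decide)]
        by_cases hM1 : M = 1
        · rw [if_pos hM1]; rfl
        · rw [if_neg hM1]
          rw [show PySem.List.sorted ([] : List Int) (fun x => x) false = [] from
            (PySem.List.sorted_eq_nil_iff _ _ _).mpr rfl]
          rw [show PySem.List.pyRange 0 (((([] : List Int).length : Int)) - 1) 1 = [] from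
            PySem.List.pyRange_one_eq_nil (by norm_num)]
          rfl
      | [x], _ =>
        simp only [countLength, countLength_alt]
        rw [if_pos (show ([x]).length = 1 by simp), if_pos (show ([x]).length < 2 by simp)]
    · have hM0 : M ≠ 0 := by
        rcases hpre with h | h
        · exact h
        · simp only [Option.getD_some] at h; omega
      rw [altVal l M (by omega)]
      by_cases hM1 : M = 1
      · subst hM1
        have hA : countLength (some l) 1 = (l.length : Int) := by
          simp only [countLength]
          rw [if_neg (by omega : ¬ l.length = 1)]
          simp
        rw [hA, bestOf_mod_one l (by intro h; subst h; simp at h2)]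
        rw [if_pos (by omega)]
      · rw [aVal l M (by omega) hM1 hM0, gA_eq_bestOf,
            bestOf_perm ((PySem.List.sorted l (fun x => x) false).map (fun x => PySem.Int.mod x M))
              (l.map (fun x => PySem.Int.mod x M))
              (List.Perm.map _ (PySem.List.sorted_perm l (fun x => x) false))]
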